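-- pv_equiv track=rewrite | github.com/LoveEmiliaForever/Attractions-Recommend-website | home.py | flag_add
-- ===== SOURCE A (Python) =====
-- def flag_add(notes):
--     flag = True
--     for dic in notes:
--         if flag:
--             dic.update({'flag': flag})
--             flag = not flag
--         else:
--             dic.update({'flag': flag})
--             flag = not flag
--     return notes
-- ===== SOURCE B (Python) =====
-- # B: processes the list in chunks of two (first of each pair -> True, second -> False),
-- # removing A's carried toggle state. Mutates the dicts in place like A; returns a list
-- # with the same value as A's return (A returns the input list object, B a fresh list).
-- def flag_add(notes):
--     out = []
--     n = len(notes)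
--     for i in range(0, n, 2):
--         notes[i]['flag'] = True
--         out.append(notes[i])
--         if i + 1 < n:
--             notes[i + 1]['flag'] = False
--             out.append(notes[i + 1])
--     return out
-- ===== Notes on version B (the rewrite author's own statement) =====
-- stated objective: alternative
-- what changed: Replaces the carried boolean toggled on every iteration by a chunked pass over pairs of elements: each pair's first dict gets flag=True and its second flag=False, so no state is threaded between iterations.
import Mathlib
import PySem

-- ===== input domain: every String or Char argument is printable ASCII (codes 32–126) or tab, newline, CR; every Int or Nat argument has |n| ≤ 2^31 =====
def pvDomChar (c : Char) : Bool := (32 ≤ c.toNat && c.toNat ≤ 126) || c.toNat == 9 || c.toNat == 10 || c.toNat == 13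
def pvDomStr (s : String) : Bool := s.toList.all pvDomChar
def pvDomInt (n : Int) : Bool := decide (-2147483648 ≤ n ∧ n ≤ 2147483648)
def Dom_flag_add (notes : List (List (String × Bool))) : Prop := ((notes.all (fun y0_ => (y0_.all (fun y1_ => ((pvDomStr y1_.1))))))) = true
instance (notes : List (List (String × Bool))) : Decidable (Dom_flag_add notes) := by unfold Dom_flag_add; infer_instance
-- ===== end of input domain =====

-- B replaces A's carried toggled boolean by a chunked pass over pairs of elements
-- (first of each pair gets flag=True, second flag=False). Both Pythons mutate the
-- dicts in place; the equivalence proved here is about the RETURN value.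


-- ===== PORT A =====
-- dic.update({'flag': v}) / dic['flag'] = v : dict insert-overwrite (PySem.Dict.insert
-- keeps the position of an existing key and appends a new one, exactly like Python).
def pyFlagUpd (d : List (String × Bool)) (v : Bool) : List (String × Bool) :=
  (PySem.Dict.insert (PySem.Dict.mk d) "flag" v).items

-- for dic in notes: toggle 'flag' with the carried boolean; return notes
def flag_add (notes : List (List (String × Bool))) : List (List (String × Bool)) :=
  (notes.foldl (fun st dic =>
      if st.2 then (st.1 ++ [pyFlagUpd dic st.2], !st.2)
      else (st.1 ++ [pyFlagUpd dic st.2], !st.2))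
    (([] : List (List (String × Bool))), true)).1

-- ===== PORT B =====
-- chunk of two elements per step: first gets True, second (if present) False
def flagAddChunks : List (List (String × Bool)) → List (List (String × Bool))
  | [] => []
  | [d] => [pyFlagUpd d true]
  | d1 :: d2 :: rest => pyFlagUpd d1 true :: pyFlagUpd d2 false :: flagAddChunks rest

def flag_add_alt (notes : List (List (String × Bool))) : List (List (String × Bool)) :=
  flagAddChunks notes

-- ===== PRECONDITION & SPEC =====
def Spec_flag_add (notes : List (List (String × Bool))) (out : List (List (String × Bool))) : Prop := out = flag_add_alt notes
instance (notes : List (List (String × Bool))) (out : List (List (String × Bool))) : Decidable (Spec_flag_add notes out) := by unfold Spec_flag_add; infer_instance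

-- ===== CLAIM (what is proved, stated in full; the proofs are below) =====
def Claim_equal_flag_add : Prop := ∀ (notes : List (List (String × Bool))), Dom_flag_add notes → Spec_flag_add notes (flag_add notes)

-- ===== LEMMAS AND PROOFS =====
-- A's fold starting from (acc, true) produces acc ++ the chunked result.
theorem flagAdd_foldl_eq_chunks (l : List (List (String × Bool)))
    (acc : List (List (String × Bool))) :
    (l.foldl (fun st dic =>
        if st.2 then (st.1 ++ [pyFlagUpd dic st.2], !st.2)
        else (st.1 ++ [pyFlagUpd dic st.2], !st.2)) (acc, true)).1
      = acc ++ flagAddChunks l := by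
  induction l using flagAddChunks.induct generalizing acc with
  | case1 => simp [flagAddChunks]
  | case2 d => simp [flagAddChunks]
  | case3 d1 d2 rest ih =>
      simp only [List.foldl, flagAddChunks, if_true, Bool.not_true, Bool.false_eq_true,
        if_false, Bool.not_false]
      rw [ih]
      simp

-- ===== VERDICT (by name: the statement is the Claim_ definition above) =====
theorem flag_add_spec : Claim_equal_flag_add := by
  intro notes _
  show flag_add notes = flag_add_alt notes
  simpa [flag_add, flag_add_alt] using flagAdd_foldl_eq_chunks notes []
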